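-- pv_equiv track=rewrite | github.com/Aleksey-Valerevich-Pavlov/WordSearch | wordserch.py | three_func
-- ===== SOURCE A (Python) =====
-- def three_func(elem):                                                  #функция разбиения на тройки слов
--     word = elem.split()
--     i = 0
--     mas3 = []
--     while i + 2 < len(word):
--         mas3.append(word[i] + ' ' + word[i + 1] + ' ' + word[i + 2])
--         i += 1
--     return(mas3)
-- ===== SOURCE B (Python) =====
-- def three_func(elem):                                                  #функция разбиения на тройки слов
--     # Streaming: one pass over the words with a two-word register window;
--     # never indexes or slices the word list (constant extra state besides output).
--     out = []
--     p2 = p1 = None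
--     for w in elem.split():
--         if p2 is not None:
--             out.append(p2 + ' ' + p1 + ' ' + w)
--         p2, p1 = p1, w
--     return out
-- ===== Notes on version B (the rewrite author's own statement) =====
-- stated objective: alternative
-- what changed: Replaces A's random-access index loop (three list indexings per step guarded by i+2 < len) with a streaming fold that traverses the words once holding only the previous two words in registers and emits a triple as each new word arrives.
import Mathlib
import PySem

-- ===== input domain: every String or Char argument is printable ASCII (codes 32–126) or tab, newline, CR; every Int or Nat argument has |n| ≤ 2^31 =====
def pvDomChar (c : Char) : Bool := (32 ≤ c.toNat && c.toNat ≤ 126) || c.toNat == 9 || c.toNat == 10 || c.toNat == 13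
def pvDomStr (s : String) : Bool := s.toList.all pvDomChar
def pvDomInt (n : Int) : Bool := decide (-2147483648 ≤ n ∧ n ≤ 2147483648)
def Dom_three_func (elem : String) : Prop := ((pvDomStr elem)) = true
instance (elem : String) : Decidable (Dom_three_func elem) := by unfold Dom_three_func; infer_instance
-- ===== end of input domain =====

-- B replaces A's indexed while-loop over the word list by a streaming fold that holds only
-- the previous two words and never indexes the list (alternative decomposition, same value).

-- ===== PORT A =====
-- the while loop: i counts up while i + 2 < len(word), appending word[i]+' '+word[i+1]+' '+word[i+2]
def threeLoopA (word : List String) (i : Nat) (mas3 : List String) : List String :=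
  if i + 2 < word.length then
    threeLoopA word (i + 1)
      (mas3 ++ [PySem.List.pyGetD word (i : Int) "" ++ " " ++
                PySem.List.pyGetD word ((i : Int) + 1) "" ++ " " ++
                PySem.List.pyGetD word ((i : Int) + 2) ""])
  else mas3
termination_by word.length - i

def three_func (elem : String) : List String :=
  let word := PySem.Str.split₀ elem
  threeLoopA word 0 []

-- ===== PORT B =====
-- the loop body: if p2 is set (then p1 is too, by the loop invariant), emit p2+' '+p1+' '+w;
-- then shift the register window (p2, p1) := (p1, w)
def stepB (st : List String × Option String × Option String) (w : String) :
    List String × Option String × Option String :=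
  match st with
  | (out, p2, p1) =>
    let out' := match p2, p1 with
      | some a, some b => out ++ [a ++ " " ++ b ++ " " ++ w]
      | _, _ => out
    (out', p1, some w)

def three_func_alt (elem : String) : List String :=
  ((PySem.Str.split₀ elem).foldl stepB ([], none, none)).1

-- ===== PRECONDITION & SPEC =====
def Spec_three_func (elem : String) (out : List String) : Prop := out = three_func_alt elem
instance (elem : String) (out : List String) : Decidable (Spec_three_func elem out) := by unfold Spec_three_func; infer_instance

-- ===== CLAIM (what is proved, stated in full; the proofs are below) =====
def Claim_equal_three_func : Prop := ∀ (elem : String), Dom_three_func elem → Spec_three_func elem (three_func elem)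

-- ===== LEMMAS AND PROOFS =====

-- common middle point: the list of joined consecutive triples
def triples : List String → List String
  | a :: b :: c :: rest => (a ++ " " ++ b ++ " " ++ c) :: triples (b :: c :: rest)
  | _ => []

lemma loopA_eq_triples (word : List String) (i : Nat) (mas3 : List String) :
    threeLoopA word i mas3 = mas3 ++ triples (word.drop i) := by
  rw [threeLoopA]
  split
  · next h =>
    have hi : i < word.length := by omega
    have hi1 : i + 1 < word.length := by omega
    have hi2 : i + 2 < word.length := by omega
    have hdrop : word.drop i = word[i] :: word[i+1] :: word[i+2] :: word.drop (i + 3) := by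
      rw [List.drop_eq_getElem_cons hi, List.drop_eq_getElem_cons hi1,
          List.drop_eq_getElem_cons hi2]
    have hdrop1 : word.drop (i + 1) = word[i+1] :: word[i+2] :: word.drop (i + 3) := by
      rw [List.drop_eq_getElem_cons hi1, List.drop_eq_getElem_cons hi2]
    rw [loopA_eq_triples word (i + 1)]
    have g0 : PySem.List.pyGetD word (i : Int) "" = word[i] :=
      PySem.List.pyGetD_ofNat word i "" hi
    have g1 : PySem.List.pyGetD word ((i : Int) + 1) "" = word[i+1] := by
      have := PySem.List.pyGetD_ofNat word (i + 1) "" hi1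
      push_cast at this; exact this
    have g2 : PySem.List.pyGetD word ((i : Int) + 2) "" = word[i+2] := by
      have := PySem.List.pyGetD_ofNat word (i + 2) "" hi2
      push_cast at this; exact this
    rw [g0, g1, g2, hdrop, hdrop1, triples]
    simp
  · next h =>
    have : triples (word.drop i) = [] := by
      have hlen : (word.drop i).length ≤ 2 := by
        simp [List.length_drop]; omega
      match hd : word.drop i with
      | [] => simp [triples]
      | [a] => simp [triples]
      | [a, b] => simp [triples]
      | a :: b :: c :: rest => rw [hd] at hlen; simp at hlen
    simp [this]
termination_by word.length - i

-- once both registers are loaded, the fold produces exactly the triples of a :: b :: ws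
lemma foldB_run (ws : List String) (a b : String) (out : List String) :
    (ws.foldl stepB (out, some a, some b)).1 = out ++ triples (a :: b :: ws) := by
  induction ws generalizing a b out with
  | nil => simp [triples]
  | cons w ws ih =>
    simp only [List.foldl_cons, stepB, triples]
    rw [ih]
    simp

lemma foldB_eq_triples (ws : List String) :
    (ws.foldl stepB ([], none, none)).1 = triples ws := by
  match ws with
  | [] => simp [triples]
  | [a] => simp [stepB, triples]
  | a :: b :: ws =>
    simp only [List.foldl_cons, stepB]
    rw [foldB_run]
    simp

-- ===== VERDICT (by name: the statement is the Claim_ definition above) =====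
theorem three_func_spec : Claim_equal_three_func := by
  intro elem _
  unfold Spec_three_func three_func three_func_alt
  rw [loopA_eq_triples, foldB_eq_triples]
  simp
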